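-- pv_equiv track=rewrite | github.com/todddole/binary-search-trees-assignment | data/reorder.py | optimal_bst_order
-- ===== SOURCE A (Python) =====
-- def optimal_bst_order(lines):
--     """
--     Returns the lines reordered optimally for insertion into a binary search tree.
--     """
--     def bst_order(start, end):
--         # Base case: when start is greater than end, return an empty list
--         if start > end:
--             return []
--         # Find the middle index
--         mid = (start + end) // 2
--         # Recursively find the order of elements for left and right subtrees
--         left = bst_order(start, mid - 1)
--         right = bst_order(mid + 1, end)
--         # Return the current element (root) followed by left and right subtree elements
--         return [mid] + left + right
--
--     # Get the optimal order of indices for BST insertion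
--     indices = bst_order(0, len(lines) - 1)
--     # Use the indices to reorder the lines
--     return [lines[i] for i in indices]
-- ===== SOURCE B (Python) =====
-- def optimal_bst_order(lines):
--     """
--     Returns the lines reordered optimally for insertion into a binary search tree.
--     Iterative: explicit stack of (start, end) ranges, preorder emission.
--     """
--     result = []
--     stack = [(0, len(lines) - 1)]
--     while stack:
--         start, end = stack.pop()
--         if start > end:
--             continue
--         mid = (start + end) // 2
--         result.append(lines[mid])
--         stack.append((mid + 1, end))
--         stack.append((start, mid - 1))
--     return result
-- ===== Notes on version B (the rewrite author's own statement) =====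
-- stated objective: alternative
-- what changed: Replaces the recursive bst_order helper plus an index list and final comprehension with a single iterative loop over an explicit stack of (start,end) ranges that appends each midpoint line directly to the result.
import Mathlib
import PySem

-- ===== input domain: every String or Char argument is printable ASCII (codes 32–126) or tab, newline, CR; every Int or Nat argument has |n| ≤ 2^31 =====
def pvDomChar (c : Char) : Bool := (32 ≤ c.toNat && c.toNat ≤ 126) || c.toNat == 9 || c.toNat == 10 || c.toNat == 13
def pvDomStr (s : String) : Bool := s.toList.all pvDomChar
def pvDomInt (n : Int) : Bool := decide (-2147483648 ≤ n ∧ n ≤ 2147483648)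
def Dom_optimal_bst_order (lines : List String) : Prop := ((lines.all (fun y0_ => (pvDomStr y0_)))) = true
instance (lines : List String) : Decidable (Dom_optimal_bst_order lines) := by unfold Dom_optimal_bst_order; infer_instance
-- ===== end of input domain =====

-- B replaces A's recursive helper + index comprehension by one iterative loop over an
-- explicit stack of (start,end) ranges; same preorder output, same O(n) cost (objective: alternative).

-- ===== PORT A =====
-- A's recursive helper bst_order(start, end). The Nat argument is fuel making the
-- recursion structural; (e - s + 1).toNat fuel always suffices, and the caller supplies
-- lines.length, so the 0-fuel branch is never taken on the call below.
def pvBstOrder : Nat → Int → Int → List Int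
  | 0, _, _ => []
  | f + 1, s, e =>
    if s > e then []
    else
      let mid := PySem.Int.floordiv (s + e) 2
      let left := pvBstOrder f s (mid - 1)
      let right := pvBstOrder f (mid + 1) e
      [mid] ++ left ++ right

-- lines[i] is always in range for the produced indices, so pyGet?'s .getD "" default is
-- never taken (exact port of A's lines[i]).
def optimal_bst_order (lines : List String) : List String :=
  let indices := pvBstOrder lines.length 0 ((lines.length : Int) - 1)
  indices.map (fun i => (PySem.List.pyGet? lines i).getD "")

-- ===== PORT B =====
-- the while loop of Source B: pop a range, emit its midpoint line, push right then left.
-- The Nat argument is fuel making the loop structural; each iteration strictly decreases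
-- the total stack weight pvWsum (below), so 2*len+1 fuel always suffices.
def pvLoop (lines : List String) : Nat → List String → List (Int × Int) → List String
  | _, acc, [] => acc
  | 0, acc, _ => acc
  | f + 1, acc, (s, e) :: rest =>
    if s > e then pvLoop lines f acc rest
    else
      let mid := PySem.Int.floordiv (s + e) 2
      pvLoop lines f (acc ++ [(PySem.List.pyGet? lines mid).getD ""])
        ((s, mid - 1) :: (mid + 1, e) :: rest)

def optimal_bst_order_alt (lines : List String) : List String :=
  pvLoop lines (2 * lines.length + 1) [] [(0, (lines.length : Int) - 1)]

-- ===== PRECONDITION & SPEC =====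
def Spec_optimal_bst_order (lines : List String) (out : List String) : Prop := out = optimal_bst_order_alt lines
instance (lines : List String) (out : List String) : Decidable (Spec_optimal_bst_order lines out) := by unfold Spec_optimal_bst_order; infer_instance

-- ===== CLAIM (what is proved, stated in full; the proofs are below) =====
def Claim_equal_optimal_bst_order : Prop := ∀ (lines : List String), Dom_optimal_bst_order lines → Spec_optimal_bst_order lines (optimal_bst_order lines)

-- ===== LEMMAS AND PROOFS =====

-- weight of the stack: an upper bound on the remaining loop iterations
def pvWsum : List (Int × Int) → Nat
  | [] => 0
  | (s, e) :: t => (2 * (e - s + 1).toNat + 1) + pvWsum t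

theorem pvBstOrder_gt (f : Nat) (s e : Int) (h : s > e) : pvBstOrder f s e = [] := by
  cases f with
  | zero => rfl
  | succ f => simp [pvBstOrder, h]

-- the result does not depend on the fuel, as long as the fuel covers the range size
theorem pvBstOrder_fuel (f : Nat) : ∀ (g : Nat) (s e : Int),
    (e - s + 1).toNat ≤ f → (e - s + 1).toNat ≤ g → pvBstOrder f s e = pvBstOrder g s e := by
  induction f with
  | zero =>
      intro g s e hf _
      have hse : s > e := by omega
      rw [pvBstOrder_gt 0 s e hse, pvBstOrder_gt g s e hse]
  | succ f ih =>
      intro g s e hf hg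
      by_cases hse : s > e
      · rw [pvBstOrder_gt _ s e hse, pvBstOrder_gt g s e hse]
      · obtain ⟨g', rfl⟩ : ∃ g', g = g' + 1 := ⟨g - 1, by omega⟩
        have hm := PySem.Int.floordiv_two_mid_bounds (lo := s) (hi := e) (by omega)
        simp only [pvBstOrder, if_neg hse]
        rw [ih g' s (PySem.Int.floordiv (s + e) 2 - 1) (by omega) (by omega),
            ih g' (PySem.Int.floordiv (s + e) 2 + 1) e (by omega) (by omega)]

-- the stack loop computes acc ++ the concatenation of A's recursive preorders of the stacked ranges
theorem pvLoop_eq (lines : List String) (f : Nat) : ∀ (acc : List String) (stack : List (Int × Int)),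
    pvWsum stack ≤ f →
    pvLoop lines f acc stack =
      acc ++ stack.flatMap (fun p => (pvBstOrder (p.2 - p.1 + 1).toNat p.1 p.2).map (fun i => (PySem.List.pyGet? lines i).getD "")) := by
  induction f with
  | zero =>
      intro acc stack hw
      cases stack with
      | nil => simp [pvLoop]
      | cons p rest => exfalso; obtain ⟨s, e⟩ := p; simp [pvWsum] at hw
  | succ f ih =>
      intro acc stack hw
      cases stack with
      | nil => simp [pvLoop]
      | cons p rest =>
        obtain ⟨s, e⟩ := p
        simp only [pvWsum] at hw
        by_cases hse : s > e
        · have hz : (e - s + 1).toNat = 0 := by omega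
          rw [pvLoop]
          simp only [if_pos hse]
          rw [ih acc rest (by omega)]
          simp [List.flatMap_cons, hz, pvBstOrder]
        · have hm := PySem.Int.floordiv_two_mid_bounds (lo := s) (hi := e) (by omega)
          obtain ⟨k, hk⟩ : ∃ k, (e - s + 1).toNat = k + 1 := ⟨(e - s + 1).toNat - 1, by omega⟩
          rw [pvLoop]
          simp only [if_neg hse]
          rw [ih (acc ++ [(PySem.List.pyGet? lines (PySem.Int.floordiv (s + e) 2)).getD ""])
                ((s, PySem.Int.floordiv (s + e) 2 - 1) :: (PySem.Int.floordiv (s + e) 2 + 1, e) :: rest)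
                (by simp only [pvWsum]; omega)]
          have hb : pvBstOrder (e - s + 1).toNat s e =
              [PySem.Int.floordiv (s + e) 2]
                ++ pvBstOrder ((PySem.Int.floordiv (s + e) 2 - 1) - s + 1).toNat s (PySem.Int.floordiv (s + e) 2 - 1)
                ++ pvBstOrder (e - (PySem.Int.floordiv (s + e) 2 + 1) + 1).toNat (PySem.Int.floordiv (s + e) 2 + 1) e := by
            rw [hk]
            simp only [pvBstOrder, if_neg hse]
            rw [pvBstOrder_fuel k ((PySem.Int.floordiv (s + e) 2 - 1) - s + 1).toNat s
                  (PySem.Int.floordiv (s + e) 2 - 1) (by omega) (by omega),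
                pvBstOrder_fuel k (e - (PySem.Int.floordiv (s + e) 2 + 1) + 1).toNat
                  (PySem.Int.floordiv (s + e) 2 + 1) e (by omega) (by omega)]
          simp [List.flatMap_cons, hb]

-- ===== VERDICT (by name: the statement is the Claim_ definition above) =====
theorem optimal_bst_order_spec : Claim_equal_optimal_bst_order := by
  intro lines _
  unfold Spec_optimal_bst_order optimal_bst_order optimal_bst_order_alt
  rw [pvLoop_eq lines (2 * lines.length + 1) [] [(0, (lines.length : Int) - 1)]
      (by simp only [pvWsum]; omega)]
  have hn : ((lines.length : Int) - 1 - 0 + 1).toNat = lines.length := by omega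
  simp only [List.flatMap_cons, List.flatMap_nil, List.nil_append, List.append_nil, hn]
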